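-- pv_equiv track=rewrite | github.com/dawit-teklu-a2sv/competitive-programming | 0290-word-pattern/0290-word-pattern.py | returnPattern
-- ===== SOURCE A (Python) =====
-- def returnPattern(s):
--     temp_dict = {}#takes array item with their previous index
--     output = []
--     for i in range(len(s)):
--         if s[i] in temp_dict:
--             output.append(temp_dict[s[i]])
--         else:
--             temp_dict[s[i]] = i
--             output.append(i)
--     return output
-- ===== SOURCE B (Python) =====
-- def returnPattern(s):
--     # Sort-then-scan instead of a hash table: stably sort the indices by their
--     # value, so equal values form runs of increasing indices; the head of each
--     # run is that value's first-occurrence index, propagated over the run.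
--     n = len(s)
--     order = sorted(range(n), key=lambda i: s[i])
--     out = [0] * n
--     prev = None
--     first = 0
--     for i in order:
--         if s[i] != prev:
--             prev = s[i]
--             first = i
--         out[i] = first
--     return out
-- ===== Notes on version B (the rewrite author's own statement) =====
-- stated objective: alternative
-- what changed: Replaces the hash-table (seen-dict) loop by sort-then-scan: stably sort the indices by their value so equal values form runs of increasing indices, then one scan over the sorted order writes each run's head (the value's first-occurrence index) into the output slots.
import Mathlib
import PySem

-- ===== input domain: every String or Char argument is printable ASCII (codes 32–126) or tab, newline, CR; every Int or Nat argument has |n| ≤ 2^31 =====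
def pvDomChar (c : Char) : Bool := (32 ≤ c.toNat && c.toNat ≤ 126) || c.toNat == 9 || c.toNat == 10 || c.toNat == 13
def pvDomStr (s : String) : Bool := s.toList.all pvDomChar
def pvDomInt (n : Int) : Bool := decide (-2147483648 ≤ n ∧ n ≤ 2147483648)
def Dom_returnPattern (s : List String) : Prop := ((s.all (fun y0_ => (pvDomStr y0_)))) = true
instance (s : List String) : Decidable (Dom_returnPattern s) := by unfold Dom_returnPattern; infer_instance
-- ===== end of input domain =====

-- B replaces A's hash-table loop by sort-then-scan: stably sort the indices by value, so equal values form runs of increasing indices whose head is the first occurrence (alternative algorithm; not faster).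

-- ===== PORT A =====
-- the loop 'for i in range(len(s))' walking s[i], carrying the dict and the running index i
def returnPatternGo (d : PySem.Dict String Int) (i : Int) : List String → List Int
  | [] => []
  | x :: rest =>
    if d.contains x then
      d.getD x 0 :: returnPatternGo d (i + 1) rest
    else
      i :: returnPatternGo (d.insert x i) (i + 1) rest

def returnPattern (s : List String) : List Int :=
  returnPatternGo PySem.Dict.empty 0 s

-- ===== PORT B =====
-- the loop 'for i in order', carrying (out, prev, first); every index i of order lies in range(len(s))
def rpScan (s : List String) : List Int → List Int × Option String × Int → List Int
  | [], (out, _, _) => out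
  | i :: rest, (out, prev, first) =>
    let x := PySem.List.pyGetD s i ""
    if some x ≠ prev then
      rpScan s rest (PySem.List.pySetD out i i, some x, i)
    else
      rpScan s rest (PySem.List.pySetD out i first, prev, first)

def returnPattern_alt (s : List String) : List Int :=
  let n : Int := (s.length : Int)
  let order := PySem.List.sorted (PySem.List.pyRange 0 n 1) (fun i => PySem.List.pyGetD s i "") false
  rpScan s order (List.replicate s.length 0, none, 0)

-- ===== PRECONDITION & SPEC =====
def Spec_returnPattern (s : List String) (out : List Int) : Prop := out = returnPattern_alt s
instance (s : List String) (out : List Int) : Decidable (Spec_returnPattern s out) := by unfold Spec_returnPattern; infer_instance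

-- ===== CLAIM (what is proved, stated in full; the proofs are below) =====
def Claim_equal_returnPattern : Prop := ∀ (s : List String), Dom_returnPattern s → Spec_returnPattern s (returnPattern s)

-- ===== LEMMAS AND PROOFS =====

-- ## A-side: the dict loop computes the first-occurrence index of each element

-- appending an element already present does not change any first-occurrence index
theorem index?_append_mem {α : Type} [DecidableEq α] (p : List α) (x y : α) (hx : x ∈ p) :
    PySem.List.index? (p ++ [x]) y = PySem.List.index? p y := by
  by_cases hy : y ∈ p
  · exact PySem.List.index?_append_of_mem [x] hy
  · have hy' : y ∉ p ++ [x] := by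
      simp only [List.mem_append, List.mem_singleton]
      rintro (h | rfl)
      · exact hy h
      · exact hy hx
    rw [(PySem.List.index?_eq_none_iff _ _).mpr hy', (PySem.List.index?_eq_none_iff _ _).mpr hy]

-- loop invariant: the dict holds exactly the first-occurrence indices of the processed prefix p
theorem go_eq_index (rest : List String) : ∀ (p : List String) (d : PySem.Dict String Int),
    (∀ y, d.get? y = (PySem.List.index? p y).map (fun k => (k : Int))) →
    returnPatternGo d (p.length : Int) rest =
      rest.map (fun x =>
        match PySem.List.index? (p ++ rest) x with
        | some k => (k : Int)
        | none => 0) := by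
  induction rest with
  | nil => intro p d _; simp [returnPatternGo]
  | cons x rest' ih =>
    intro p d hinv
    simp only [returnPatternGo, List.map_cons]
    have hassoc : p ++ x :: rest' = (p ++ [x]) ++ rest' := by simp
    have hcont : d.contains x = (PySem.List.index? p x).isSome := by
      rw [PySem.Dict.contains_eq_isSome_get?, hinv x]
      cases PySem.List.index? p x <;> rfl
    have hlen : (p.length : Int) + 1 = ((p ++ [x]).length : Int) := by simp
    by_cases hc : d.contains x = true
    · rw [if_pos hc]
      have hsome : (PySem.List.index? p x).isSome = true := by rw [← hcont]; exact hc
      have hmem : x ∈ p := (PySem.List.index?_isSome_iff _ _).mp hsome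
      rcases Option.isSome_iff_exists.mp hsome with ⟨k, hk⟩
      have hget : d.get? x = some (k : Int) := by rw [hinv x, hk]; rfl
      have hhead : (match PySem.List.index? (p ++ x :: rest') x with
          | some k => (k : Int) | none => 0) = (k : Int) := by
        rw [hassoc, PySem.List.index?_append_of_mem rest' (by simp [hmem]),
          index?_append_mem p x x hmem, hk]
      rw [hhead, PySem.Dict.getD_of_get?_eq_some _ 0 hget]
      have hinv' : ∀ y, d.get? y = (PySem.List.index? (p ++ [x]) y).map (fun k => (k : Int)) := by
        intro y; rw [hinv y, index?_append_mem p x y hmem]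
      rw [hlen, ih (p ++ [x]) d hinv', hassoc]
    · rw [if_neg hc]
      have hmem : x ∉ p := by
        intro hx
        exact hc (by rw [hcont]; exact (PySem.List.index?_isSome_iff _ _).mpr hx)
      have hhead : (match PySem.List.index? (p ++ x :: rest') x with
          | some k => (k : Int) | none => 0) = (p.length : Int) := by
        rw [hassoc, PySem.List.index?_append_of_mem rest' (by simp),
          PySem.List.index?_append_singleton_self p x hmem]
      rw [hhead]
      have hinv' : ∀ y, (d.insert x (p.length : Int)).get? y =
          (PySem.List.index? (p ++ [x]) y).map (fun k => (k : Int)) := by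
        intro y
        by_cases hyx : y = x
        · subst hyx
          rw [PySem.Dict.get?_insert_self, PySem.List.index?_append_singleton_self p y hmem]
          rfl
        · rw [PySem.Dict.get?_insert_of_ne _ _ hyx, hinv y]
          by_cases hyp : y ∈ p
          · rw [PySem.List.index?_append_of_mem [x] hyp]
          · rw [(PySem.List.index?_eq_none_iff _ _).mpr hyp,
              (PySem.List.index?_eq_none_iff _ _).mpr (by simp [hyp, hyx])]
      rw [hlen, ih (p ++ [x]) (d.insert x (p.length : Int)) hinv', hassoc]

theorem returnPattern_eq_map (s : List String) :
    returnPattern s = s.map (fun x =>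
      match PySem.List.index? s x with
      | some k => (k : Int)
      | none => 0) := by
  have h := go_eq_index s [] PySem.Dict.empty (by intro y; simp [PySem.Dict.get?_empty])
  simpa [returnPattern] using h

-- ## B-side: stability of the sort, then correctness of the scan

-- insertion splits a key-sorted list: everything after the inserted element has a strictly larger key
theorem insertBy_split {α κ : Type} [LinearOrder κ] (key : α → κ) (x : α) :
    ∀ (l : List α), l.Pairwise (fun a b => key a ≤ key b) →
    ∃ l₁ l₂, l = l₁ ++ l₂ ∧
      PySem.List.insertBy (fun a b => decide (key a < key b)) x l = l₁ ++ x :: l₂ ∧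
      (∀ y ∈ l₂, key x < key y) := by
  intro l
  induction l with
  | nil => intro _; exact ⟨[], [], rfl, by simp [PySem.List.insertBy], by simp⟩
  | cons y ys ih =>
    intro hs
    by_cases h : key x < key y
    · refine ⟨[], y :: ys, rfl, by simp [PySem.List.insertBy, h], ?_⟩
      intro z hz
      rcases List.mem_cons.mp hz with rfl | hz'
      · exact h
      · exact lt_of_lt_of_le h ((List.pairwise_cons.mp hs).1 z hz')
    · rcases ih (List.pairwise_cons.mp hs).2 with ⟨l₁, l₂, heq, hins, hgt⟩
      exact ⟨y :: l₁, l₂, by simp [heq], by simp [PySem.List.insertBy, h, hins], hgt⟩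

-- STABILITY: the subsequence of elements with any one fixed key is preserved by the stable sort
theorem filter_key_sorted {α κ : Type} [LinearOrder κ] (key : α → κ) (v : κ) (xs : List α) :
    (PySem.List.sorted xs key false).filter (fun a => decide (key a = v)) =
      xs.filter (fun a => decide (key a = v)) := by
  induction xs using List.reverseRecOn with
  | nil => simp [PySem.List.sorted_eq_foldl_insertBy]
  | append_singleton xs x ih =>
    have hstep : PySem.List.sorted (xs ++ [x]) key false =
        PySem.List.insertBy (fun a b => decide (key a < key b)) x
          (PySem.List.sorted xs key false) := by
      rw [PySem.List.sorted_eq_foldl_insertBy, PySem.List.sorted_eq_foldl_insertBy,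
        List.foldl_append]
      rfl
    rcases insertBy_split key x (PySem.List.sorted xs key false)
      (PySem.List.sorted_pairwise xs key) with ⟨l₁, l₂, heq, hins, hgt⟩
    have hl₂ : l₂.filter (fun a => decide (key a = v)) = [] ∨ ¬ key x = v := by
      by_cases hxv : key x = v
      · left
        rw [List.filter_eq_nil_iff]
        intro z hz
        simp only [decide_eq_true_eq]
        exact fun hzv => absurd (hxv ▸ hzv) (ne_of_gt (hgt z hz))
      · right; exact hxv
    rw [hstep, hins, List.filter_append, List.filter_cons, List.filter_append]
    have hsplit : l₁.filter (fun a => decide (key a = v)) ++ l₂.filter (fun a => decide (key a = v)) =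
        xs.filter (fun a => decide (key a = v)) := by
      rw [← List.filter_append, ← heq, ih]
    by_cases hxv : key x = v
    · rcases hl₂ with h2 | h2
      · simp [hxv, h2, ← hsplit]
      · exact absurd hxv h2
    · simp [hxv, hsplit]

-- the first element of 'range(n) filtered to a property' is the least index satisfying it
theorem headD_filter_pyRange_aux (P : Int → Bool) (n k : Int) (hk : k < n) (hP : P k = true)
    (hlt : ∀ j, 0 ≤ j → j < k → P j = false) :
    ∀ (m : Nat) (a : Int), k - a = (m : Int) → 0 ≤ a →
      ((PySem.List.pyRange a n 1).filter P).headD 0 = k := by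
  intro m
  induction m with
  | zero =>
    intro a ha _
    have hak : a = k := by omega
    subst hak
    rw [PySem.List.pyRange_one_cons hk, List.filter_cons, if_pos hP]
    rfl
  | succ m ih =>
    intro a ha h0
    have hak : a < k := by omega
    rw [PySem.List.pyRange_one_cons (by omega : a < n), List.filter_cons,
      if_neg (by simp [hlt a h0 hak])]
    exact ih (a + 1) (by omega) (by omega)

theorem headD_filter_pyRange (P : Int → Bool) (n k : Int) (h0 : 0 ≤ k) (hk : k < n)
    (hP : P k = true) (hlt : ∀ j, 0 ≤ j → j < k → P j = false) :
    ((PySem.List.pyRange 0 n 1).filter P).headD 0 = k :=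
  headD_filter_pyRange_aux P n k hk hP hlt k.toNat 0 (by omega) le_rfl

-- scan invariant: over a key-sorted duplicate-free index list whose keys all dominate prev,
-- each visited position receives its carried run head (prev match) or its run head in l
theorem rpScan_inv (s : List String) : ∀ (l : List Int) (out : List Int) (prev : Option String) (first : Int),
    l.Nodup →
    (∀ i ∈ l, 0 ≤ i ∧ i.toNat < out.length) →
    l.Pairwise (fun a b => PySem.List.pyGetD s a "" ≤ PySem.List.pyGetD s b "") →
    (∀ v, prev = some v → ∀ j ∈ l, v ≤ PySem.List.pyGetD s j "") →
    (rpScan s l (out, prev, first)).length = out.length ∧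
    (∀ p ∈ l, (rpScan s l (out, prev, first))[p.toNat]? =
      some (if prev = some (PySem.List.pyGetD s p "") then first
        else (l.filter (fun j => decide (PySem.List.pyGetD s j "" = PySem.List.pyGetD s p ""))).headD 0)) ∧
    (∀ q : Nat, (∀ p ∈ l, p.toNat ≠ q) → (rpScan s l (out, prev, first))[q]? = out[q]?) := by
  intro l
  induction l with
  | nil => intro out prev first _ _ _ _; exact ⟨rfl, by simp, fun q _ => rfl⟩
  | cons i rest ih =>
    intro out prev first hnd hrange hs hprev
    have hi0 : 0 ≤ i := (hrange i (List.mem_cons_self)).1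
    have hilen : i.toNat < out.length := (hrange i (List.mem_cons_self)).2
    have hinr : i ∉ rest := (List.nodup_cons.mp hnd).1
    have hnd' : rest.Nodup := (List.nodup_cons.mp hnd).2
    have hs' : rest.Pairwise (fun a b => PySem.List.pyGetD s a "" ≤ PySem.List.pyGetD s b "") :=
      (List.pairwise_cons.mp hs).2
    have hile : ∀ j ∈ rest, PySem.List.pyGetD s i "" ≤ PySem.List.pyGetD s j "" :=
      (List.pairwise_cons.mp hs).1
    have hner : ∀ p ∈ rest, p.toNat ≠ i.toNat := by
      intro p hp hc
      have hp0 : 0 ≤ p := (hrange p (List.mem_cons_of_mem _ hp)).1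
      have hpi : p = i := by omega
      exact hinr (hpi ▸ hp)
    by_cases hp : prev = some (PySem.List.pyGetD s i "")
    · -- run continues: out[i] = first, state unchanged
      have hcond : ¬ (some (PySem.List.pyGetD s i "") ≠ prev) := by simp [hp]
      have hstep : rpScan s (i :: rest) (out, prev, first) =
          rpScan s rest (out.set i.toNat first, prev, first) := by
        simp only [rpScan]
        rw [if_neg hcond, PySem.List.pySetD_of_nonneg _ _ hi0]
      have hrange' : ∀ j ∈ rest, 0 ≤ j ∧ j.toNat < (out.set i.toNat first).length := by
        intro j hj
        have := hrange j (List.mem_cons_of_mem _ hj)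
        simpa using this
      have hprev' : ∀ v, prev = some v → ∀ j ∈ rest, v ≤ PySem.List.pyGetD s j "" := by
        intro v hv j hj; exact hprev v hv j (List.mem_cons_of_mem _ hj)
      obtain ⟨IH1, IH2, IH3⟩ := ih (out.set i.toNat first) prev first hnd' hrange' hs' hprev'
      refine ⟨by rw [hstep, IH1]; simp, ?_, ?_⟩
      · intro p hpmem
        rcases List.mem_cons.mp hpmem with rfl | hpr
        · rw [hstep, IH3 p.toNat (hner), List.getElem?_set_self hilen, if_pos hp]
        · by_cases hpp : prev = some (PySem.List.pyGetD s p "")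
          · rw [hstep, IH2 p hpr, if_pos hpp, if_pos hpp]
          · have hne : ¬ (PySem.List.pyGetD s i "" = PySem.List.pyGetD s p "") := by
              intro h; exact hpp (h ▸ hp)
            rw [hstep, IH2 p hpr, if_neg hpp, if_neg hpp, List.filter_cons, if_neg (by simp [hne])]
      · intro q hq
        have hqi : i.toNat ≠ q := hq i (List.mem_cons_self)
        rw [hstep, IH3 q (fun p hp => hq p (List.mem_cons_of_mem _ hp)),
          List.getElem?_set_ne hqi]
    · -- new run starts at i: out[i] = i, prev := s[i], first := i
      have hcond : (some (PySem.List.pyGetD s i "") ≠ prev) := by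
        intro h; exact hp h.symm
      have hstep : rpScan s (i :: rest) (out, prev, first) =
          rpScan s rest (out.set i.toNat i, some (PySem.List.pyGetD s i ""), i) := by
        simp only [rpScan, PySem.List.pySetD_of_nonneg _ _ hi0]
        rw [if_pos hcond]
      have hrange' : ∀ j ∈ rest, 0 ≤ j ∧ j.toNat < (out.set i.toNat i).length := by
        intro j hj
        have := hrange j (List.mem_cons_of_mem _ hj)
        simpa using this
      have hprev' : ∀ v, some (PySem.List.pyGetD s i "") = some v →
          ∀ j ∈ rest, v ≤ PySem.List.pyGetD s j "" := by
        intro v hv j hj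
        cases Option.some.inj hv
        exact hile j hj
      obtain ⟨IH1, IH2, IH3⟩ := ih (out.set i.toNat i) (some (PySem.List.pyGetD s i "")) i
        hnd' hrange' hs' hprev'
      refine ⟨by rw [hstep, IH1]; simp, ?_, ?_⟩
      · intro p hpmem
        rcases List.mem_cons.mp hpmem with rfl | hpr
        · rw [hstep, IH3 p.toNat (hner), List.getElem?_set_self hilen, if_neg hp,
            List.filter_cons, if_pos (by simp)]
          rfl
        · by_cases hk : PySem.List.pyGetD s p "" = PySem.List.pyGetD s i ""
          · have hppn : ¬ prev = some (PySem.List.pyGetD s p "") := by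
              rw [hk]; exact hp
            rw [hstep, IH2 p hpr, if_pos (by rw [hk]), if_neg hppn,
              List.filter_cons, if_pos (by simp [hk])]
            rfl
          · have hppn : ¬ prev = some (PySem.List.pyGetD s p "") := by
              intro hpv
              -- prev's value is below every key in i :: rest yet equals key p, forcing key p = key i
              have h1 := hprev _ hpv i (List.mem_cons_self)
              have h2 := hile p hpr
              exact hk (le_antisymm h1 h2)
            rw [hstep, IH2 p hpr, if_neg (by simp [Ne.symm hk]), if_neg hppn,
              List.filter_cons, if_neg (by simp [Ne.symm hk])]
      · intro q hq
        have hqi : i.toNat ≠ q := hq i (List.mem_cons_self)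
        rw [hstep, IH3 q (fun p hp => hq p (List.mem_cons_of_mem _ hp)),
          List.getElem?_set_ne hqi]

-- assembly: B also computes the map of first-occurrence indices
theorem alt_eq_map (s : List String) :
    returnPattern_alt s = s.map (fun x =>
      match PySem.List.index? s x with
      | some k => (k : Int)
      | none => 0) := by
  have hmemo : ∀ i : Int, i ∈ PySem.List.sorted (PySem.List.pyRange 0 (s.length : Int) 1)
      (fun i => PySem.List.pyGetD s i "") false ↔ 0 ≤ i ∧ i < (s.length : Int) := by
    intro i
    rw [PySem.List.mem_sorted]
    exact PySem.List.mem_pyRange_one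
  have hnd := ((PySem.List.sorted_perm (PySem.List.pyRange 0 (s.length : Int) 1)
    (fun i => PySem.List.pyGetD s i "") false).nodup_iff).mpr
    (PySem.List.nodup_pyRange_one 0 (s.length : Int))
  have hrange : ∀ i ∈ PySem.List.sorted (PySem.List.pyRange 0 (s.length : Int) 1)
      (fun i => PySem.List.pyGetD s i "") false,
      0 ≤ i ∧ i.toNat < (List.replicate s.length (0 : Int)).length := by
    intro i hi
    rcases (hmemo i).mp hi with ⟨h0, h1⟩
    refine ⟨h0, ?_⟩
    simp only [List.length_replicate]
    omega
  obtain ⟨H1, H2, H3⟩ := rpScan_inv s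
    (PySem.List.sorted (PySem.List.pyRange 0 (s.length : Int) 1)
      (fun i => PySem.List.pyGetD s i "") false)
    (List.replicate s.length 0) none 0 hnd hrange
    (PySem.List.sorted_pairwise _ _) (by intro v hv; cases hv)
  have hdef : returnPattern_alt s = rpScan s
      (PySem.List.sorted (PySem.List.pyRange 0 (s.length : Int) 1)
        (fun i => PySem.List.pyGetD s i "") false)
      (List.replicate s.length 0, none, 0) := rfl
  rw [hdef]
  apply List.ext_getElem?
  intro q
  by_cases hq : q < s.length
  · have hmem : ((q : Nat) : Int) ∈ PySem.List.sorted (PySem.List.pyRange 0 (s.length : Int) 1)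
        (fun i => PySem.List.pyGetD s i "") false := (hmemo _).mpr ⟨by omega, by omega⟩
    have hval := H2 _ hmem
    have htn : ((q : Nat) : Int).toNat = q := by omega
    rw [htn] at hval
    have hkeyq : PySem.List.pyGetD s ((q : Nat) : Int) "" = s[q] := by
      rw [PySem.List.pyGetD_eq_getElem s "" (by omega) (by exact_mod_cast hq)]
      simp only [Int.toNat_natCast]
    have hsq : s[q] ∈ s := List.getElem_mem hq
    rcases Option.isSome_iff_exists.mp ((PySem.List.index?_isSome_iff s s[q]).mpr hsq)
      with ⟨k0, hk0⟩
    rcases PySem.List.getElem_of_index?_eq_some hk0 with ⟨hklen, hkeq, hkmin⟩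
    have hhead : ((PySem.List.pyRange 0 (s.length : Int) 1).filter
        (fun j => decide (PySem.List.pyGetD s j "" = PySem.List.pyGetD s ((q : Nat) : Int) ""))).headD 0
        = (k0 : Int) := by
      apply headD_filter_pyRange _ _ (k0 : Int) (by omega) (by exact_mod_cast hklen)
      · rw [hkeyq]
        simp only [decide_eq_true_eq]
        rw [PySem.List.pyGetD_eq_getElem s "" (by omega) (by exact_mod_cast hklen)]
        simp only [Int.toNat_natCast]
        exact hkeq
      · intro j hj0 hjk
        rw [hkeyq]
        simp only [decide_eq_false_iff_not]
        rw [PySem.List.pyGetD_eq_getElem s "" hj0 (by omega)]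
        exact hkmin j.toNat (by omega)
    rw [hval, if_neg (by simp), filter_key_sorted (fun i => PySem.List.pyGetD s i "") _ _, hhead,
      List.getElem?_map, List.getElem?_eq_getElem hq]
    simp only [Option.map_some, hk0]
  · have hlen1 : (rpScan s (PySem.List.sorted (PySem.List.pyRange 0 (s.length : Int) 1)
        (fun i => PySem.List.pyGetD s i "") false) (List.replicate s.length 0, none, 0)).length
        = s.length := by rw [H1, List.length_replicate]
    rw [List.getElem?_eq_none (by omega), List.getElem?_eq_none (by simpa using hq)]

-- ===== VERDICT (by name: the statement is the Claim_ definition above) =====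
theorem returnPattern_spec : Claim_equal_returnPattern := by
  intro s _
  unfold Spec_returnPattern
  rw [returnPattern_eq_map, alt_eq_map]
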